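-- pv_equiv track=rewrite | github.com/drivenow/HSI-Classification | project/vertCode/ImagePre.py | getImgStBoard
-- ===== SOURCE A (Python) =====
-- def getImgStBoard(imgVec):
--     lstRowId=0
--     bkFlag=False
--     for y in range(0,80,1):
--         for x in range(0,30,1):
--             if imgVec[x][y]<230:
--                 bkFlag=True
--                 break
--         if bkFlag == True:
--             break
--         lstRowId+=1
--     return lstRowId
-- ===== SOURCE B (Python) =====
-- def getImgStBoard(imgVec):
--     # Row-major pass: the first column containing a dark pixel is the minimum,
--     # over the first 30 rows, of each row's earliest dark column (80 if none).
--     best = 80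
--     for row in imgVec[:30]:
--         first = 80
--         for y, v in enumerate(row[:80]):
--             if v < 230:
--                 first = y
--                 break
--         if first < best:
--             best = first
--     return best
-- ===== Notes on version B (the rewrite author's own statement) =====
-- stated objective: alternative
-- what changed: Replaces the column-major double loop with flag/break early exit by a total row-major pass that takes the minimum over rows of each row's earliest dark-column index, never indexing out of range.
import Mathlib
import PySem

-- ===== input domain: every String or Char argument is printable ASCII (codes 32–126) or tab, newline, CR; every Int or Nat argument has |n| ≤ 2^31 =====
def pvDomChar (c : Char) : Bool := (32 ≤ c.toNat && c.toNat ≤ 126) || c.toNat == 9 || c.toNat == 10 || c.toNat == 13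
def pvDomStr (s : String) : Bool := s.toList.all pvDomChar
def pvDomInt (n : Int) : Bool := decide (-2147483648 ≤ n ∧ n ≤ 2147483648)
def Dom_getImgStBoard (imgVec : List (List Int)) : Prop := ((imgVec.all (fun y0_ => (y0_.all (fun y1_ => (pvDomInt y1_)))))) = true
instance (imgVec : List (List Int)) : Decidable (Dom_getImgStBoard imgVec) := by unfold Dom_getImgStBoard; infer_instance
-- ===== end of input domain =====

-- B replaces A's column-major flag/break scan by a total row-major pass taking the
-- minimum over rows of each row's earliest dark column; equivalence is about the
-- return value only (neither version mutates its argument).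

-- ===== PORT A =====
-- inner 'for x in range(0,30,1)' with break: returns the bkFlag set by the loop.
-- indices are nonnegative, so imgVec[x][y] = getD x/getD y; the defaults are only
-- reachable where Python raises IndexError, which Pre_ excludes.
def aInner (imgVec : List (List Int)) (y : Nat) : List Nat → Bool
  | [] => false
  | x :: xs => if (imgVec.getD x []).getD y 0 < 230 then true else aInner imgVec y xs

-- outer 'for y in range(0,80,1)' with the lstRowId counter and the break on bkFlag
def aOuter (imgVec : List (List Int)) (lstRowId : Int) : List Nat → Int
  | [] => lstRowId
  | y :: ys => if aInner imgVec y (List.range 30) then lstRowId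
               else aOuter imgVec (lstRowId + 1) ys

def getImgStBoard (imgVec : List (List Int)) : Int := aOuter imgVec 0 (List.range 80)

-- ===== PORT B =====
-- 'for y, v in enumerate(row[:80])' with break: first dark index in the row, 80 if none
def bInner : List Int → Nat → Int
  | [], _ => 80
  | v :: vs, y => if v < 230 then (y : Int) else bInner vs (y + 1)

-- 'for row in imgVec[:30]' keeping the running minimum 'best'
def bOuter (best : Int) : List (List Int) → Int
  | [] => best
  | row :: rows =>
      let first := bInner (row.take 80) 0
      bOuter (if first < best then first else best) rows

def getImgStBoard_alt (imgVec : List (List Int)) : Int := bOuter 80 (imgVec.take 30)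

-- ===== PRECONDITION & SPEC =====
-- position (x,y) is in range and light (no IndexError, pixel >= 230)
def pvLightAt (v : List (List Int)) (x y : Nat) : Bool :=
  decide (x < v.length) && decide (y < (v.getD x []).length) && decide (230 ≤ (v.getD x []).getD y 0)
-- column y is scanned completely without a dark pixel and without an IndexError
def pvColLight (v : List (List Int)) (y : Nat) : Bool := (List.range 30).all (fun x => pvLightAt v x y)
-- column y hits a dark pixel before any IndexError
def pvColDark (v : List (List Int)) (y : Nat) : Bool := (List.range 30).any (fun x =>
  decide (x < v.length) && decide (y < (v.getD x []).length) && decide ((v.getD x []).getD y 0 < 230)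
    && (List.range x).all (fun x' => pvLightAt v x' y))
-- exactly the inputs on which A returns (its lexicographic scan meets a dark pixel,
-- or finishes all 80 columns, before any out-of-range access)
def Pre_getImgStBoard (imgVec : List (List Int)) : Prop :=
  ((List.range 80).all (pvColLight imgVec) ||
   (List.range 80).any (fun y => (List.range y).all (pvColLight imgVec) && pvColDark imgVec y)) = true
instance (imgVec : List (List Int)) : Decidable (Pre_getImgStBoard imgVec) := by
  unfold Pre_getImgStBoard; infer_instance

def pvWitness_getImgStBoard : List (List Int) := [[100]]

def Spec_getImgStBoard (imgVec : List (List Int)) (out : Int) : Prop := out = getImgStBoard_alt imgVec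
instance (imgVec : List (List Int)) (out : Int) : Decidable (Spec_getImgStBoard imgVec out) := by unfold Spec_getImgStBoard; infer_instance

-- ===== CLAIM (what is proved, stated in full; the proofs are below) =====
def Claim_equal_getImgStBoard : Prop := ∀ (imgVec : List (List Int)), Dom_getImgStBoard imgVec → Pre_getImgStBoard imgVec → Spec_getImgStBoard imgVec (getImgStBoard imgVec)

-- ===== LEMMAS AND PROOFS =====

lemma aInner_eq_any (imgVec : List (List Int)) (y : Nat) (xs : List Nat) :
    aInner imgVec y xs = xs.any (fun x => decide ((imgVec.getD x []).getD y 0 < 230)) := by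
  induction xs with
  | nil => rfl
  | cons x xs ih => by_cases h : (imgVec.getD x []).getD y 0 < 230 <;> simp [aInner, ih]

lemma aOuter_takeWhile (imgVec : List (List Int)) (ys : List Nat) (c : Int) :
    aOuter imgVec c ys = c + ((ys.takeWhile (fun y => !aInner imgVec y (List.range 30))).length : Int) := by
  induction ys generalizing c with
  | nil => simp [aOuter]
  | cons y ys ih =>
      by_cases h : aInner imgVec y (List.range 30)
      · simp [aOuter, h]
      · simp [aOuter, h, ih]; omega

lemma takeWhile_range'_len (p : Nat → Bool) :
    ∀ (n s Y : Nat), Y < n → (∀ i < Y, p (s + i) = true) → p (s + Y) = false →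
      ((List.range' s n).takeWhile p).length = Y := by
  intro n
  induction n with
  | zero => omega
  | succ n ih =>
      intro s Y hY hlt hY'
      rw [List.range'_succ, List.takeWhile_cons]
      cases Y with
      | zero => simp only [Nat.add_zero] at hY'; simp [hY']
      | succ Y =>
          have h0 : p s = true := by simpa using hlt 0 (by omega)
          have h1 : ∀ i < Y, p (s + 1 + i) = true := by
            intro i hi
            have := hlt (i + 1) (by omega)
            rwa [show s + 1 + i = s + (i + 1) by omega]
          have h2 : p (s + 1 + Y) = false := by
            rwa [show s + 1 + Y = s + (Y + 1) by omega]
          have := ih (s + 1) Y (by omega) h1 h2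
          simp [h0, this]

lemma bInner_ge (l : List Int) : ∀ (y0 Y : Nat), Y ≤ 80 →
    (∀ i < l.length, y0 + i < Y → 230 ≤ l.getD i 0) → (Y : Int) ≤ bInner l y0 := by
  induction l with
  | nil => intro y0 Y hY _; simp [bInner]; omega
  | cons v vs ih =>
      intro y0 Y hY h
      by_cases hv : v < 230
      · have : ¬ y0 < Y := by
          intro hlt
          have := h 0 (by simp) (by omega)
          simp [List.getD] at this; omega
        simp [bInner, hv]; omega
      · simp only [bInner, if_neg hv]
        exact ih (y0 + 1) Y hY (fun i hi hlt => by
          have := h (i + 1) (by simpa using hi) (by omega)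
          simpa [List.getD] using this)

lemma bInner_le (l : List Int) : ∀ (y0 j : Nat), j < l.length → l.getD j 0 < 230 →
    bInner l y0 ≤ (y0 : Int) + j := by
  induction l with
  | nil => intro _ j hj; simp at hj
  | cons v vs ih =>
      intro y0 j hj hd
      by_cases hv : v < 230
      · simp [bInner, hv]
      · simp only [bInner, if_neg hv]
        cases j with
        | zero => exact absurd (by simpa [List.getD] using hd) hv
        | succ j =>
            have := ih (y0 + 1) j (by simpa using hj) (by simpa [List.getD] using hd)
            push_cast at this ⊢
            omega

lemma bOuter_le_best (best : Int) : ∀ (rows : List (List Int)), bOuter best rows ≤ best := by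
  intro rows
  induction rows generalizing best with
  | nil => simp [bOuter]
  | cons r rows ih =>
      simp only [bOuter]
      split_ifs with h
      · exact le_trans (ih _) (by omega)
      · exact ih _

lemma bOuter_ge (Y : Int) : ∀ (rows : List (List Int)) (best : Int), Y ≤ best →
    (∀ r ∈ rows, Y ≤ bInner (r.take 80) 0) → Y ≤ bOuter best rows := by
  intro rows
  induction rows with
  | nil => intro best hb _; simpa [bOuter] using hb
  | cons r rows ih =>
      intro best hb h
      simp only [bOuter]
      split_ifs with hlt
      · exact ih _ (h r (by simp)) (fun r' hr' => h r' (by simp [hr']))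
      · exact ih _ hb (fun r' hr' => h r' (by simp [hr']))

lemma bOuter_le_mem (r : List Int) : ∀ (rows : List (List Int)) (best : Int), r ∈ rows →
    bOuter best rows ≤ bInner (r.take 80) 0 := by
  intro rows
  induction rows with
  | nil => intro _ h; simp at h
  | cons r' rows ih =>
      intro best hmem
      simp only [bOuter]
      rcases List.mem_cons.mp hmem with rfl | hmem
      · split_ifs with hlt
        · exact le_trans (bOuter_le_best _ _) le_rfl
        · exact le_trans (bOuter_le_best _ _) (by omega)
      · split_ifs <;> exact ih _ hmem

lemma getD_take_eq (l : List Int) (n i : Nat) (hi : i < n) :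
    (l.take n).getD i 0 = l.getD i 0 := by
  simp [List.getD, hi]

-- Prop reading of Pre_: used only by the proofs below
def ColLight (imgVec : List (List Int)) (y : Nat) : Prop :=
  ∀ x < 30, x < imgVec.length ∧ y < (imgVec.getD x []).length ∧ 230 ≤ (imgVec.getD x []).getD y 0
def ColDark (imgVec : List (List Int)) (y : Nat) : Prop :=
  ∃ x < 30, (x < imgVec.length ∧ y < (imgVec.getD x []).length ∧ (imgVec.getD x []).getD y 0 < 230) ∧
    ∀ x' < x, x' < imgVec.length ∧ y < (imgVec.getD x' []).length ∧ 230 ≤ (imgVec.getD x' []).getD y 0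

lemma colLight_iff (v : List (List Int)) (y : Nat) :
    pvColLight v y = true ↔ ColLight v y := by
  unfold pvColLight pvLightAt ColLight
  simp [List.all_eq_true, List.mem_range, and_assoc]

lemma colDark_iff (v : List (List Int)) (y : Nat) :
    pvColDark v y = true ↔ ColDark v y := by
  unfold pvColDark pvLightAt ColDark
  simp [List.any_eq_true, List.all_eq_true, List.mem_range, and_assoc]

lemma pre_iff (v : List (List Int)) :
    Pre_getImgStBoard v ↔
      (∀ y < 80, ColLight v y) ∨ ∃ y < 80, (∀ y' < y, ColLight v y') ∧ ColDark v y := by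
  unfold Pre_getImgStBoard
  simp only [Bool.or_eq_true, Bool.and_eq_true, List.all_eq_true, List.any_eq_true,
    List.mem_range, colLight_iff, colDark_iff]

lemma aInner_false_iff (imgVec : List (List Int)) (y : Nat) :
    aInner imgVec y (List.range 30) = false ↔ ∀ x < 30, 230 ≤ (imgVec.getD x []).getD y 0 := by
  rw [aInner_eq_any]
  simp

lemma getD_of_lt (l : List (List Int)) (x : Nat) (h : x < l.length) :
    l.getD x [] = l[x] := by
  simp [List.getD, h]

lemma row_of_mem_take (imgVec : List (List Int)) (r : List Int) (hr : r ∈ imgVec.take 30) :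
    ∃ x, ∃ hx : x < imgVec.length, x < 30 ∧ imgVec[x] = r := by
  obtain ⟨i, hi, hEq⟩ := List.mem_iff_getElem.mp hr
  have hlen : i < min 30 imgVec.length := by simpa using hi
  refine ⟨i, by omega, by omega, ?_⟩
  rw [← hEq, List.getElem_take]

-- ===== VERDICT (by name: the statement is the Claim_ definition above) =====
theorem getImgStBoard_spec : Claim_equal_getImgStBoard := by
  intro imgVec _ hpre
  unfold Spec_getImgStBoard getImgStBoard getImgStBoard_alt
  rw [aOuter_takeWhile]
  rcases (pre_iff imgVec).mp hpre with hlight | ⟨Y, hY80, hbefore, hdarkY⟩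
  · -- all 80 columns are fully scanned and light: both sides are 80
    have htw : (List.range 80).takeWhile (fun y => !aInner imgVec y (List.range 30)) = List.range 80 := by
      rw [List.takeWhile_eq_self_iff]
      intro y hy
      have hy80 : y < 80 := List.mem_range.mp hy
      simp [(aInner_false_iff imgVec y).mpr (fun x hx => ((hlight y hy80) x hx).2.2)]
    have hge : (80 : Int) ≤ bOuter 80 (imgVec.take 30) := by
      refine bOuter_ge 80 _ 80 le_rfl ?_
      intro r hr
      obtain ⟨x, hx, hx30, rfl⟩ := row_of_mem_take imgVec r hr
      refine bInner_ge _ 0 80 le_rfl ?_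
      intro i hi hi80
      have hiL : i < 80 := by omega
      rw [getD_take_eq _ _ _ hiL]
      have := ((hlight i hiL) x hx30).2.2
      rwa [getD_of_lt _ _ hx] at this
    have hle := bOuter_le_best 80 (imgVec.take 30)
    rw [htw]
    simp only [List.length_range]
    push_cast
    omega
  · -- column Y is the first with a dark pixel: both sides are Y
    obtain ⟨x0, hx030, ⟨hx0n, hYlen, hdark⟩, hprev⟩ := hdarkY
    have htw : ((List.range 80).takeWhile (fun y => !aInner imgVec y (List.range 30))).length = Y := by
      rw [show List.range 80 = List.range' 0 80 from List.range_eq_range']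
      refine takeWhile_range'_len _ 80 0 Y hY80 ?_ ?_
      · intro i hi
        simp only [Bool.not_eq_true']
        exact (aInner_false_iff imgVec (0 + i)).mpr
          (fun x hx => by simpa using ((hbefore i hi) x hx).2.2)
      · have h1 : aInner imgVec Y (List.range 30) = true := by
          rw [aInner_eq_any]
          simp only [List.any_eq_true, List.mem_range, decide_eq_true_eq]
          exact ⟨x0, hx030, hdark⟩
        simpa using h1
    rw [htw]
    have hBle : bOuter 80 (imgVec.take 30) ≤ (Y : Int) := by
      have hmem : imgVec[x0] ∈ imgVec.take 30 := by
        have hx0' : x0 < (imgVec.take 30).length := by simp; omega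
        have := List.getElem_mem hx0'
        rwa [List.getElem_take] at this
      refine le_trans (bOuter_le_mem _ _ 80 hmem) ?_
      have hYr : Y < (imgVec[x0].take 80).length := by
        simp only [List.length_take]
        rw [getD_of_lt _ _ hx0n] at hYlen
        omega
      have := bInner_le (imgVec[x0].take 80) 0 Y hYr
        (by rw [getD_take_eq _ _ _ hY80, ← getD_of_lt _ _ hx0n]; exact hdark)
      simpa using this
    have hBge : (Y : Int) ≤ bOuter 80 (imgVec.take 30) := by
      refine bOuter_ge _ _ 80 (by exact_mod_cast Nat.le_of_lt hY80) ?_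
      intro r hr
      obtain ⟨x, hx, hx30, rfl⟩ := row_of_mem_take imgVec r hr
      refine bInner_ge _ 0 Y (by omega) ?_
      intro i hi hiY
      have hiL : i < 80 := by omega
      rw [getD_take_eq _ _ _ hiL]
      have := ((hbefore i (by omega)) x hx30).2.2
      rwa [getD_of_lt _ _ hx] at this
    omega
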